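-- pv_equiv track=rewrite | github.com/Mattis3403/Analytische-Geometrie-Rechner | StandardLib.py | get_klam
-- ===== SOURCE A (Python) =====
-- def get_klam(dim_n=3, klammertyp="rund"):
--     """Gibt die Bausteine einer runden Klammer zurück."""
--     if klammertyp in ["r", "rund"]:
--         klam = ["⎛", "⎜", "⎝"], ["⎞", "⎟", "⎠"]
--     elif klammertyp in ["e", "eckig"]:
--         klam = [["⎡", "⎢", "⎣"], ["⎤", "⎥", "⎦	"]]
--     elif klammertyp in ["g", "geschwungen"]:
--         klam = [["⎧", "⎨", "⎩", "⎪"], ["⎫", "⎬", "⎭", "⎪"]]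
--
--     out = [[], []]
--     if klammertyp in ["r", "rund", "e", "eckig"]:
--         if dim_n == 1:
--             out = [["("], [")"]]
--
--         else:
--             for i in range(dim_n):
--                 for j in range(2):
--                     if i == 0:
--                         out[j].append(klam[j][0])
--
--                     elif i == dim_n - 1:
--                         out[j].append(klam[j][2])
--
--                     else:
--                         out[j].append(klam[j][1])
--     else:
--         if dim_n == 1:
--             out = [["{"], ["}"]]
--
--         elif dim_n == 2:
--             out = [["⎰", "⎱"], ["⎱", "⎰"]]
--
--         else:
--             mitte = int(dim_n / 2)
--             for i in range(dim_n):
--                 for j in range(2):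
--                     if i == 0:
--                         out[j].append(klam[j][0])
--
--                     elif i == dim_n - 1:
--                         out[j].append(klam[j][2])
--
--                     elif i == mitte:
--                         out[j].append(klam[j][1])
--
--                     else:
--                         out[j].append(klam[j][3])
--     return out
-- ===== SOURCE B (Python) =====
-- KLAM = {
--     "r": [["\u239b", "\u239c", "\u239d"], ["\u239e", "\u239f", "\u23a0"]],
--     "rund": [["\u239b", "\u239c", "\u239d"], ["\u239e", "\u239f", "\u23a0"]],
--     "e": [["\u23a1", "\u23a2", "\u23a3"], ["\u23a4", "\u23a5", "\u23a6\t"]],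
--     "eckig": [["\u23a1", "\u23a2", "\u23a3"], ["\u23a4", "\u23a5", "\u23a6\t"]],
--     "g": [["\u23a7", "\u23a8", "\u23a9", "\u23aa"], ["\u23ab", "\u23ac", "\u23ad", "\u23aa"]],
--     "geschwungen": [["\u23a7", "\u23a8", "\u23a9", "\u23aa"], ["\u23ab", "\u23ac", "\u23ad", "\u23aa"]],
-- }
--
--
-- def get_klam(dim_n=3, klammertyp="rund"):
--     """Closed-form construction of each bracket side (no per-cell nested loop)."""
--     if klammertyp in ("r", "rund", "e", "eckig"):
--         if dim_n == 1:
--             return [["("], [")"]]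
--         if dim_n <= 0:
--             return [[], []]
--         return [[row[0]] + [row[1]] * (dim_n - 2) + [row[2]]
--                 for row in KLAM[klammertyp]]
--     if dim_n == 1:
--         return [["{"], ["}"]]
--     if dim_n == 2:
--         return [["\u23b0", "\u23b1"], ["\u23b1", "\u23b0"]]
--     if dim_n <= 0:
--         return [[], []]
--     mitte = dim_n // 2
--     out = []
--     for row in KLAM[klammertyp]:
--         col = [row[0]] + [row[3]] * (dim_n - 2) + [row[2]]
--         col[mitte] = row[1]
--         out.append(col)
--     return out
-- ===== Notes on version B (the rewrite author's own statement) =====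
-- stated objective: simpler
-- what changed: Replaces the per-cell nested i/j loop mutating out[j] with closed-form construction of each bracket side (first glyph + repeated middle glyph + last glyph, with the curly middle set at index dim_n//2) mapped over a bracket table keyed by klammertyp.
import Mathlib
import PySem

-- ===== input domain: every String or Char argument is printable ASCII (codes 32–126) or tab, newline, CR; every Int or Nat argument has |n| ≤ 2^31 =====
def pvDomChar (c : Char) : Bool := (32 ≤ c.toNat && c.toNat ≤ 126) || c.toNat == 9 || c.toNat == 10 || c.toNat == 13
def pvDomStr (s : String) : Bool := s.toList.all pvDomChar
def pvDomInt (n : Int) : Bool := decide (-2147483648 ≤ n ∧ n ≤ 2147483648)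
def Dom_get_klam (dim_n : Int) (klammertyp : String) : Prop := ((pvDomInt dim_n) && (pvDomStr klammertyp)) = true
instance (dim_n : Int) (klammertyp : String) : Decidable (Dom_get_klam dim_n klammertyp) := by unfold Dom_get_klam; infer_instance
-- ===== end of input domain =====

-- B replaces A's per-cell nested loop by closed-form construction of each bracket side
-- (objective: simpler). Inputs where the Python A raises UnboundLocalError are excluded by Pre_.

-- ===== PORT A =====
def get_klam (dim_n : Int) (klammertyp : String) : List (List String) :=
  -- klam = [] models Python's UNBOUND local; it is only read on inputs excluded by Pre_
  let klam : List (List String) :=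
    if klammertyp = "r" ∨ klammertyp = "rund" then [["⎛","⎜","⎝"],["⎞","⎟","⎠"]]
    else if klammertyp = "e" ∨ klammertyp = "eckig" then [["⎡","⎢","⎣"],["⎤","⎥","⎦\t"]]
    else if klammertyp = "g" ∨ klammertyp = "geschwungen" then [["⎧","⎨","⎩","⎪"],["⎫","⎬","⎭","⎪"]]
    else []
  let out : List (List String) := [[], []]
  if klammertyp = "r" ∨ klammertyp = "rund" ∨ klammertyp = "e" ∨ klammertyp = "eckig" then
    if dim_n = 1 then [["("],[")"]]
    else
      (PySem.List.pyRange 0 dim_n 1).foldl (fun out i =>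
        (PySem.List.pyRange 0 2 1).foldl (fun out j =>
          let c : String :=
            if i = 0 then (klam.getD j.toNat []).getD 0 ""
            else if i = dim_n - 1 then (klam.getD j.toNat []).getD 2 ""
            else (klam.getD j.toNat []).getD 1 ""
          out.set j.toNat ((out.getD j.toNat []) ++ [c])) out) out
  else
    if dim_n = 1 then [["{"],["}"]]
    else if dim_n = 2 then [["⎰","⎱"],["⎱","⎰"]]
    else
      -- int(dim_n / 2) truncates toward zero: Int.tdiv (exact on the domain, where dim_n/2 is float-exact)
      let mitte : Int := dim_n.tdiv 2
      (PySem.List.pyRange 0 dim_n 1).foldl (fun out i =>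
        (PySem.List.pyRange 0 2 1).foldl (fun out j =>
          let c : String :=
            if i = 0 then (klam.getD j.toNat []).getD 0 ""
            else if i = dim_n - 1 then (klam.getD j.toNat []).getD 2 ""
            else if i = mitte then (klam.getD j.toNat []).getD 1 ""
            else (klam.getD j.toNat []).getD 3 ""
          out.set j.toNat ((out.getD j.toNat []) ++ [c])) out) out

-- ===== PORT B =====
def pvKLAM : PySem.Dict String (List (List String)) :=
  PySem.Dict.ofList
    [("r", [["⎛","⎜","⎝"],["⎞","⎟","⎠"]]),
     ("rund", [["⎛","⎜","⎝"],["⎞","⎟","⎠"]]),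
     ("e", [["⎡","⎢","⎣"],["⎤","⎥","⎦\t"]]),
     ("eckig", [["⎡","⎢","⎣"],["⎤","⎥","⎦\t"]]),
     ("g", [["⎧","⎨","⎩","⎪"],["⎫","⎬","⎭","⎪"]]),
     ("geschwungen", [["⎧","⎨","⎩","⎪"],["⎫","⎬","⎭","⎪"]])]

def get_klam_alt (dim_n : Int) (klammertyp : String) : List (List String) :=
  if klammertyp = "r" ∨ klammertyp = "rund" ∨ klammertyp = "e" ∨ klammertyp = "eckig" then
    if dim_n = 1 then [["("],[")"]]
    else if dim_n ≤ 0 then [[],[]]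
    else
      (PySem.Dict.getD pvKLAM klammertyp []).map (fun row =>
        [row.getD 0 ""] ++ List.replicate (dim_n - 2).toNat (row.getD 1 "") ++ [row.getD 2 ""])
  else if dim_n = 1 then [["{"],["}"]]
  else if dim_n = 2 then [["⎰","⎱"],["⎱","⎰"]]
  else if dim_n ≤ 0 then [[],[]]
  else
    let mitte : Int := PySem.Int.floordiv dim_n 2
    (PySem.Dict.getD pvKLAM klammertyp []).map (fun row =>
      ([row.getD 0 ""] ++ List.replicate (dim_n - 2).toNat (row.getD 3 "") ++ [row.getD 2 ""]).set
        mitte.toNat (row.getD 1 ""))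

-- ===== PRECONDITION & SPEC =====
-- Pre_ excludes exactly the inputs where A raises UnboundLocalError: an unrecognized
-- klammertyp together with dim_n ≥ 3 reaches the loop that reads the unbound klam.
def Pre_get_klam (dim_n : Int) (klammertyp : String) : Prop :=
  klammertyp = "r" ∨ klammertyp = "rund" ∨ klammertyp = "e" ∨ klammertyp = "eckig" ∨
  klammertyp = "g" ∨ klammertyp = "geschwungen" ∨ dim_n ≤ 2
instance (dim_n : Int) (klammertyp : String) : Decidable (Pre_get_klam dim_n klammertyp) := by
  unfold Pre_get_klam; infer_instance
def pvWitness_get_klam : Int × String := (3, "rund")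

def Spec_get_klam (dim_n : Int) (klammertyp : String) (out : List (List String)) : Prop := out = get_klam_alt dim_n klammertyp
instance (dim_n : Int) (klammertyp : String) (out : List (List String)) : Decidable (Spec_get_klam dim_n klammertyp out) := by unfold Spec_get_klam; infer_instance

-- ===== CLAIM (what is proved, stated in full; the proofs are below) =====
def Claim_equal_get_klam : Prop := ∀ (dim_n : Int) (klammertyp : String), Dom_get_klam dim_n klammertyp → Pre_get_klam dim_n klammertyp → Spec_get_klam dim_n klammertyp (get_klam dim_n klammertyp)

-- ===== LEMMAS AND PROOFS =====

-- A's nested i/j loop as a pure function of the cell glyphs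
theorem pvOuterFold (g : Int → Int → String) (L : List Int) :
    ∀ (u v : List String),
      L.foldl (fun out i =>
        (PySem.List.pyRange 0 2 1).foldl (fun out j =>
          out.set j.toNat ((out.getD j.toNat []) ++ [g i j])) out) [u, v]
      = [u ++ L.map (fun i => g i 0), v ++ L.map (fun i => g i 1)] := by
  induction L with
  | nil => intro u v; simp
  | cons i L ih =>
    intro u v
    have h2 : PySem.List.pyRange 0 2 1 = [0, 1] := by decide
    have hstep : (PySem.List.pyRange 0 2 1).foldl (fun out j =>
          out.set j.toNat ((out.getD j.toNat []) ++ [g i j])) [u, v]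
        = [u ++ [g i 0], v ++ [g i 1]] := by
      rw [h2]; simp [List.getD]
    rw [List.foldl_cons]
    rw [hstep, ih]
    simp


theorem pvGetSandwich (a b c : String) (m k : Nat) (h : k < 1 + m + 1) :
    ([a] ++ List.replicate m b ++ [c])[k]'(by simp; omega)
    = if k = 0 then a else if k = m + 1 then c else b := by
  rcases eq_or_ne k 0 with h0 | h0
  · subst h0; simp
  rcases eq_or_ne k (m + 1) with h1 | h1
  · subst h1; simp [List.getElem_append]
  · obtain ⟨j, rfl⟩ : ∃ j, k = j + 1 := ⟨k - 1, by omega⟩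
    have hj : j < m := by omega
    simp [List.getElem_append, hj]
    omega

theorem pvRoundRow (n : Int) (hn : 2 ≤ n) (a b c : String) :
    (PySem.List.pyRange 0 n 1).map (fun i => if i = 0 then a else if i = n - 1 then c else b)
    = [a] ++ List.replicate (n - 2).toNat b ++ [c] := by
  rw [PySem.List.pyRange_one]
  apply List.ext_getElem
  · simp; omega
  · intro k h1 h2
    rw [pvGetSandwich a b c _ k (by simp at h2; omega)]
    simp only [List.getElem_map, List.getElem_range, zero_add]
    have hk : k < n.toNat := by simpa using h1
    split_ifs with c1 c2 c3 c4 <;> first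
      | rfl
      | (exfalso; omega)

theorem pvCurlyRow (n mitte : Int) (h3 : 3 ≤ n) (hm1 : 1 ≤ mitte) (hm2 : mitte ≤ n - 2)
    (a m c e : String) :
    (PySem.List.pyRange 0 n 1).map
      (fun i => if i = 0 then a else if i = n - 1 then c else if i = mitte then m else e)
    = ([a] ++ List.replicate (n - 2).toNat e ++ [c]).set mitte.toNat m := by
  rw [PySem.List.pyRange_one]
  apply List.ext_getElem
  · simp; omega
  · intro k h1 h2
    have hk : k < n.toNat := by simpa using h1
    have hlen : k < 1 + (n - 2).toNat + 1 := by omega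
    rw [List.getElem_set, pvGetSandwich a e c _ k hlen]
    simp only [List.getElem_map, List.getElem_range, zero_add]
    split_ifs with c1 c2 c3 c4 c5 <;> first
      | rfl
      | (exfalso; omega)

theorem pvLoopRound (n : Int) (hn : 2 ≤ n) (klam : List (List String)) :
    (PySem.List.pyRange 0 n 1).foldl (fun out i =>
        (PySem.List.pyRange 0 2 1).foldl (fun out j =>
          out.set j.toNat ((out.getD j.toNat []) ++
            [if i = 0 then (klam.getD j.toNat []).getD 0 ""
             else if i = n - 1 then (klam.getD j.toNat []).getD 2 ""
             else (klam.getD j.toNat []).getD 1 ""])) out) [[], []]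
    = [[(klam.getD 0 []).getD 0 ""] ++
         List.replicate (n - 2).toNat ((klam.getD 0 []).getD 1 "") ++ [(klam.getD 0 []).getD 2 ""],
       [(klam.getD 1 []).getD 0 ""] ++
         List.replicate (n - 2).toNat ((klam.getD 1 []).getD 1 "") ++ [(klam.getD 1 []).getD 2 ""]] := by
  rw [pvOuterFold]
  norm_num
  exact ⟨pvRoundRow n hn _ _ _, pvRoundRow n hn _ _ _⟩

theorem pvLoopCurly (n mitte : Int) (h3 : 3 ≤ n) (hm1 : 1 ≤ mitte) (hm2 : mitte ≤ n - 2)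
    (klam : List (List String)) :
    (PySem.List.pyRange 0 n 1).foldl (fun out i =>
        (PySem.List.pyRange 0 2 1).foldl (fun out j =>
          out.set j.toNat ((out.getD j.toNat []) ++
            [if i = 0 then (klam.getD j.toNat []).getD 0 ""
             else if i = n - 1 then (klam.getD j.toNat []).getD 2 ""
             else if i = mitte then (klam.getD j.toNat []).getD 1 ""
             else (klam.getD j.toNat []).getD 3 ""])) out) [[], []]
    = [([(klam.getD 0 []).getD 0 ""] ++
          List.replicate (n - 2).toNat ((klam.getD 0 []).getD 3 "") ++
          [(klam.getD 0 []).getD 2 ""]).set mitte.toNat ((klam.getD 0 []).getD 1 ""),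
       ([(klam.getD 1 []).getD 0 ""] ++
          List.replicate (n - 2).toNat ((klam.getD 1 []).getD 3 "") ++
          [(klam.getD 1 []).getD 2 ""]).set mitte.toNat ((klam.getD 1 []).getD 1 "")] := by
  rw [pvOuterFold]
  norm_num
  exact ⟨pvCurlyRow n mitte h3 hm1 hm2 _ _ _ _, pvCurlyRow n mitte h3 hm1 hm2 _ _ _ _⟩

-- ===== VERDICT (by name: the statement is the Claim_ definition above) =====
theorem get_klam_spec : Claim_equal_get_klam := by
  intro n t _ hpre
  unfold Spec_get_klam
  by_cases hr : t = "r"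
  · subst hr
    by_cases h1 : n = 1
    · subst h1; decide
    by_cases h0 : n ≤ 0
    · simp only [get_klam, get_klam_alt, String.reduceEq, reduceIte, or_true, true_or, or_false, false_or,
        if_true, if_false]
      rw [if_neg h1, if_neg h1, if_pos h0, PySem.List.pyRange_one_eq_nil h0]
      rfl
    · have hn : (2:Int) ≤ n := by omega
      simp only [get_klam, get_klam_alt, String.reduceEq, reduceIte, or_true, true_or, or_false, false_or,
        if_true, if_false]
      rw [if_neg h1, if_neg h1, if_neg h0, pvLoopRound n hn,
        show PySem.Dict.getD pvKLAM "r" [] = [["⎛","⎜","⎝"],["⎞","⎟","⎠"]] from by decide]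
      simp
  by_cases hrund : t = "rund"
  · subst hrund
    by_cases h1 : n = 1
    · subst h1; decide
    by_cases h0 : n ≤ 0
    · simp only [get_klam, get_klam_alt, String.reduceEq, reduceIte, or_true, true_or, or_false, false_or,
        if_true, if_false]
      rw [if_neg h1, if_neg h1, if_pos h0, PySem.List.pyRange_one_eq_nil h0]
      rfl
    · have hn : (2:Int) ≤ n := by omega
      simp only [get_klam, get_klam_alt, String.reduceEq, reduceIte, or_true, true_or, or_false, false_or,
        if_true, if_false]
      rw [if_neg h1, if_neg h1, if_neg h0, pvLoopRound n hn,
        show PySem.Dict.getD pvKLAM "rund" [] = [["⎛","⎜","⎝"],["⎞","⎟","⎠"]] from by decide]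
      simp
  by_cases he : t = "e"
  · subst he
    by_cases h1 : n = 1
    · subst h1; decide
    by_cases h0 : n ≤ 0
    · simp only [get_klam, get_klam_alt, String.reduceEq, reduceIte, or_true, true_or, or_false, false_or,
        if_true, if_false]
      rw [if_neg h1, if_neg h1, if_pos h0, PySem.List.pyRange_one_eq_nil h0]
      rfl
    · have hn : (2:Int) ≤ n := by omega
      simp only [get_klam, get_klam_alt, String.reduceEq, reduceIte, or_true, true_or, or_false, false_or,
        if_true, if_false]
      rw [if_neg h1, if_neg h1, if_neg h0, pvLoopRound n hn,
        show PySem.Dict.getD pvKLAM "e" [] = [["⎡","⎢","⎣"],["⎤","⎥","⎦\t"]] from by decide]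
      simp
  by_cases heckig : t = "eckig"
  · subst heckig
    by_cases h1 : n = 1
    · subst h1; decide
    by_cases h0 : n ≤ 0
    · simp only [get_klam, get_klam_alt, String.reduceEq, reduceIte, or_true, true_or, or_false, false_or,
        if_true, if_false]
      rw [if_neg h1, if_neg h1, if_pos h0, PySem.List.pyRange_one_eq_nil h0]
      rfl
    · have hn : (2:Int) ≤ n := by omega
      simp only [get_klam, get_klam_alt, String.reduceEq, reduceIte, or_true, true_or, or_false, false_or,
        if_true, if_false]
      rw [if_neg h1, if_neg h1, if_neg h0, pvLoopRound n hn,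
        show PySem.Dict.getD pvKLAM "eckig" [] = [["⎡","⎢","⎣"],["⎤","⎥","⎦\t"]] from by decide]
      simp
  by_cases hg : t = "g"
  · subst hg
    by_cases h1 : n = 1
    · subst h1; decide
    by_cases h2 : n = 2
    · subst h2; decide
    by_cases h0 : n ≤ 0
    · simp only [get_klam, get_klam_alt, String.reduceEq, reduceIte, or_true, true_or, or_false, false_or,
        if_true, if_false]
      rw [if_neg h1, if_neg h2, if_neg h1, if_neg h2, if_pos h0,
        PySem.List.pyRange_one_eq_nil h0]
      rfl
    · have h3 : (3:Int) ≤ n := by omega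
      have htd : n.tdiv 2 = n / 2 := Int.tdiv_eq_ediv_of_nonneg (by omega)
      have hfd : PySem.Int.floordiv n 2 = n / 2 := PySem.Int.floordiv_eq_ediv_of_pos (by norm_num)
      simp only [get_klam, get_klam_alt, String.reduceEq, reduceIte, or_true, true_or, or_false, false_or,
        if_true, if_false]
      rw [if_neg h1, if_neg h2, if_neg h1, if_neg h2, if_neg h0, htd, hfd,
        pvLoopCurly n (n / 2) h3 (by omega) (by omega),
        show PySem.Dict.getD pvKLAM "g" [] = [["⎧","⎨","⎩","⎪"],["⎫","⎬","⎭","⎪"]] from by decide]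
      simp
  by_cases hgeschwungen : t = "geschwungen"
  · subst hgeschwungen
    by_cases h1 : n = 1
    · subst h1; decide
    by_cases h2 : n = 2
    · subst h2; decide
    by_cases h0 : n ≤ 0
    · simp only [get_klam, get_klam_alt, String.reduceEq, reduceIte, or_true, true_or, or_false, false_or,
        if_true, if_false]
      rw [if_neg h1, if_neg h2, if_neg h1, if_neg h2, if_pos h0,
        PySem.List.pyRange_one_eq_nil h0]
      rfl
    · have h3 : (3:Int) ≤ n := by omega
      have htd : n.tdiv 2 = n / 2 := Int.tdiv_eq_ediv_of_nonneg (by omega)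
      have hfd : PySem.Int.floordiv n 2 = n / 2 := PySem.Int.floordiv_eq_ediv_of_pos (by norm_num)
      simp only [get_klam, get_klam_alt, String.reduceEq, reduceIte, or_true, true_or, or_false, false_or,
        if_true, if_false]
      rw [if_neg h1, if_neg h2, if_neg h1, if_neg h2, if_neg h0, htd, hfd,
        pvLoopCurly n (n / 2) h3 (by omega) (by omega),
        show PySem.Dict.getD pvKLAM "geschwungen" [] = [["⎧","⎨","⎩","⎪"],["⎫","⎬","⎭","⎪"]] from by decide]
      simp
  · -- unrecognized klammertyp: Pre_ gives n ≤ 2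
    have hn2 : n ≤ 2 := by
      rcases hpre with h|h|h|h|h|h|h <;> first | omega | (exfalso; tauto)
    have h4 : ¬(t = "r" ∨ t = "rund" ∨ t = "e" ∨ t = "eckig") := by tauto
    simp only [get_klam, get_klam_alt]
    rw [if_neg h4, if_neg h4]
    by_cases h1 : n = 1
    · rw [if_pos h1, if_pos h1]
    by_cases h2 : n = 2
    · rw [if_neg h1, if_pos h2, if_neg h1, if_pos h2]
    · have h0 : n ≤ 0 := by omega
      rw [if_neg h1, if_neg h2, if_neg h1, if_neg h2, if_pos h0,
        PySem.List.pyRange_one_eq_nil h0]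
      rfl
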